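-- pv_equiv track=rewrite | github.com/akayola/python_vs_js_algorithms | python/char_count/char_count_alpha_numeric_func.py | char_count_alpha_numeric
-- ===== SOURCE A (Python) =====
-- def char_count_alpha_numeric(string):
--     count = {}
--     for char in string:
--         if isAlphaNumeric(char):
--             char = char.lower()
--             if char in count:
--                 count[char] += 1
--             else:
--                 count[char] = 1
--     return count
--
-- def isAlphaNumeric(char):
--     code = ord(char)
--     if (
--         not (code > 47 and code < 58) and # match numeric (0-9)
--         not (code > 64 and code < 91) and # match upper alpha (A-Z)
--         not (code > 96 and code < 123)    # match lower alpha (a-z)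
--        ):
--         return False
--     return True
-- ===== SOURCE B (Python) =====
-- def char_count_alpha_numeric(string):
--     filtered = [c.lower() for c in string if _is_alnum_ascii(c)]
--     return {c: filtered.count(c) for c in dict.fromkeys(filtered)}
--
-- def _is_alnum_ascii(char):
--     code = ord(char)
--     return 47 < code < 58 or 64 < code < 91 or 96 < code < 123
-- ===== Notes on version B (the rewrite author's own statement) =====
-- stated objective: alternative
-- what changed: Instead of a streaming dict tally, B first builds the lowercased filtered character sequence and then produces the dict in one comprehension over the first-occurrence-deduplicated keys, counting each key with list.count.
import Mathlib
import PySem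

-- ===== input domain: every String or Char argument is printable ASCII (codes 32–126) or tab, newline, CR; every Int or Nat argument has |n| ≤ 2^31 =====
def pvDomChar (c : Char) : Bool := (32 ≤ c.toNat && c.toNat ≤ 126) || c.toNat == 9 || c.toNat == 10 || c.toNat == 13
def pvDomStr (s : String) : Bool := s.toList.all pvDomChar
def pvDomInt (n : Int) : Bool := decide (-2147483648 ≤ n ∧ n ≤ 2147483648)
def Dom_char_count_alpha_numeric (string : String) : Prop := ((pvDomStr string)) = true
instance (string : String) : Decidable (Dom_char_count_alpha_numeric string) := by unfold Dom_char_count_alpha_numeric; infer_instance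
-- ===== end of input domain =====

-- ===== PORT A =====
-- B restates the tally as a build-then-count-per-distinct-key pass; same result, no speed claim.
-- A's helper isAlphaNumeric, literally (the negated range test returning False, else True)
def pvIsAlphaNumeric (char : Char) : Bool :=
  let code := char.toNat
  if !(decide (code > 47) && decide (code < 58)) &&
     !(decide (code > 64) && decide (code < 91)) &&
     !(decide (code > 96) && decide (code < 123)) then false else true

def char_count_alpha_numeric (string : String) : List (String × Int) :=
  (string.toList.foldl (fun (count : PySem.Dict String Int) char =>
      if pvIsAlphaNumeric char then
        let ch := PySem.Str.lower (String.mk [char])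
        if count.contains ch then count.insert ch (count.getD ch 0 + 1)
        else count.insert ch 1
      else count) PySem.Dict.empty).items

-- ===== PORT B =====
-- B's helper _is_alnum_ascii: direct chained-comparison form
def pvIsAlnumAscii (char : Char) : Bool :=
  let code := char.toNat
  (decide (47 < code) && decide (code < 58)) ||
  (decide (64 < code) && decide (code < 91)) ||
  (decide (96 < code) && decide (code < 123))

def char_count_alpha_numeric_alt (string : String) : List (String × Int) :=
  let filtered := string.toList.filterMap (fun c =>
    if pvIsAlnumAscii c then some (PySem.Str.lower (String.mk [c])) else none)
  (PySem.List.dedup filtered).map (fun c => (c, (PySem.List.count filtered c : Int)))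

-- ===== PRECONDITION & SPEC =====
def Spec_char_count_alpha_numeric (string : String) (out : List (String × Int)) : Prop := out = char_count_alpha_numeric_alt string
instance (string : String) (out : List (String × Int)) : Decidable (Spec_char_count_alpha_numeric string out) := by unfold Spec_char_count_alpha_numeric; infer_instance

-- ===== CLAIM (what is proved, stated in full; the proofs are below) =====
def Claim_equal_char_count_alpha_numeric : Prop := ∀ (string : String), Dom_char_count_alpha_numeric string → Spec_char_count_alpha_numeric string (char_count_alpha_numeric string)

-- ===== LEMMAS AND PROOFS =====

theorem pv_alnum_eq (c : Char) : pvIsAlphaNumeric c = pvIsAlnumAscii c := by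
  simp only [pvIsAlphaNumeric, pvIsAlnumAscii]
  generalize decide (c.toNat > 47) = a
  generalize decide (c.toNat < 58) = b
  generalize decide (c.toNat > 64) = d
  generalize decide (c.toNat < 91) = e
  generalize decide (c.toNat > 96) = f
  generalize decide (c.toNat < 123) = g
  cases a <;> cases b <;> cases d <;> cases e <;> cases f <;> cases g <;> rfl

theorem pv_stepA_eq (d : PySem.Dict String Int) (ch : String) :
    (if d.contains ch then d.insert ch (d.getD ch 0 + 1) else d.insert ch 1) =
    d.insert ch (d.getD ch 0 + 1) := by
  by_cases h : d.contains ch = true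
  · simp [h]
  · have hnone : d.get? ch = none := by
      have := PySem.Dict.contains_eq_isSome_get? d ch
      cases hg : d.get? ch with
      | none => rfl
      | some v => rw [hg] at this; simp at this; exact absurd this h
    simp [h, PySem.Dict.getD, hnone]

theorem pv_fold_filter (l : List Char) (d : PySem.Dict String Int) :
    l.foldl (fun (count : PySem.Dict String Int) char =>
      if pvIsAlphaNumeric char then
        let ch := PySem.Str.lower (String.mk [char])
        if count.contains ch then count.insert ch (count.getD ch 0 + 1)
        else count.insert ch 1
      else count) d =
    (l.filterMap (fun c =>
      if pvIsAlnumAscii c then some (PySem.Str.lower (String.mk [c])) else none)).foldl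
        (fun (count : PySem.Dict String Int) ch => count.insert ch (count.getD ch 0 + 1)) d := by
  induction l generalizing d with
  | nil => rfl
  | cons c t ih =>
    rw [List.foldl_cons, List.filterMap_cons, pv_alnum_eq c]
    by_cases h : pvIsAlnumAscii c = true
    · rw [if_pos h, if_pos h, List.foldl_cons]
      rw [pv_stepA_eq]
      exact ih _
    · rw [if_neg h, if_neg h]
      exact ih d

-- ===== VERDICT (by name: the statement is the Claim_ definition above) =====
theorem char_count_alpha_numeric_spec : Claim_equal_char_count_alpha_numeric := by
  intro s _
  unfold Spec_char_count_alpha_numeric char_count_alpha_numeric char_count_alpha_numeric_alt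
  rw [pv_fold_filter]
  rw [PySem.Dict.foldl_insert_getD_add_one_eq_counter]
  rw [PySem.Dict.items_counter]
  simp [PySem.List.count_eq]
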